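-- pv_equiv track=rewrite | github.com/greenstar1151/Baekjoon | 11052_카드 구매하기/11052_카드 구매하기_241126.py | solution
-- ===== SOURCE A (Python) =====
-- def solution(N: int, cardpacks: list[int]):
--     DP = [0 for _ in range(N + 1)]
--     DP[1] = cardpacks[0]
--
--     for i in range(2, N + 1):
--         DP[i] = cardpacks[i - 1]
--         max_price = 0
--         for j in range(i // 2 + 1):
--             price = DP[i - j] + DP[j]
--             if price > max_price:
--                 max_price = price
--         DP[i] = max_price
--     return DP[N]
-- ===== SOURCE B (Python) =====
-- def solution(N: int, cardpacks: list[int]):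
--     # Grow the DP table by appending. The candidate prices for the next entry are
--     # exactly the pairwise sums of the reversed table with the pack prices
--     # (one pack of size j + optimum for the remaining cards), floored at 0 as in A.
--     DP = [0, cardpacks[0]]
--     for _ in range(2, N + 1):
--         DP.append(max(0, max(d + p for d, p in zip(reversed(DP), cardpacks))))
--     return DP[N]
-- ===== Notes on version B (the rewrite author's own statement) =====
-- stated objective: alternative
-- what changed: A fills a preallocated array in place, taking an inner max of two-subproblem splits DP[i-j]+DP[j] over j=0..i//2 with a manual compare; B grows the table by appending and obtains each new entry index-free as the max over zip(reversed(DP), cardpacks) of the unbounded-knapsack sums DP[i-j]+cardpacks[j-1].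
import Mathlib
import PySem

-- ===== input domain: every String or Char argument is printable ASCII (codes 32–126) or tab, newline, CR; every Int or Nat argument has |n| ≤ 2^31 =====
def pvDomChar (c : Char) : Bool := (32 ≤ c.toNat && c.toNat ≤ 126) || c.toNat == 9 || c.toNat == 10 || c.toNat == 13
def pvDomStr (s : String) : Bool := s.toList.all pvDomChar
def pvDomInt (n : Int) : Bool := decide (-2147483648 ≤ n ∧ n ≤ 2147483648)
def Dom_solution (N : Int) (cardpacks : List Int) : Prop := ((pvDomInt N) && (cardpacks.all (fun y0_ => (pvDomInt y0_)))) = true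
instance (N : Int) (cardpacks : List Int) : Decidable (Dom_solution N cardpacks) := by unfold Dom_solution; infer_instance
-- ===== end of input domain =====

-- B replaces A's in-place split recurrence (DP preset, inner max of DP[i-j]+DP[j], j ≤ i//2)
-- by an append-grown table whose next entry is the max over zip(reversed(DP), cardpacks)
-- of the unbounded-knapsack sums DP[i-j]+cardpacks[j-1]; same values, same cost class.

-- ===== PORT A =====
def solution (N : Int) (cardpacks : List Int) : Int :=
  -- DP = [0 for _ in range(N + 1)]
  let DP0 : List Int := (PySem.List.pyRange 0 (N + 1) 1).map (fun _ => (0 : Int))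
  -- DP[1] = cardpacks[0]   (IndexError when out of range: excluded by Pre_)
  let DP1 : List Int := PySem.List.pySetD DP0 1 (PySem.List.pyGetD cardpacks 0 0)
  -- for i in range(2, N + 1): ...
  let DPf : List Int := (PySem.List.pyRange 2 (N + 1) 1).foldl (fun DP i =>
    let DP' := PySem.List.pySetD DP i (PySem.List.pyGetD cardpacks (i - 1) 0)
    let mp : Int := (PySem.List.pyRange 0 (PySem.Int.floordiv i 2 + 1) 1).foldl (fun m j =>
      let price := PySem.List.pyGetD DP' (i - j) 0 + PySem.List.pyGetD DP' j 0
      if price > m then price else m) 0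
    PySem.List.pySetD DP' i mp) DP1
  PySem.List.pyGetD DPf N 0

-- ===== PORT B =====
-- max(0, max(d + p for d, p in zip(reversed(DP), cardpacks))); the inner max raises
-- ValueError on an empty zip (cardpacks = [], excluded by Pre_) — ported via
-- PySem.List.max? with default 0 there.
def solutionAltBest (DP cardpacks : List Int) : Int :=
  max 0 ((PySem.List.max? ((DP.reverse.zip cardpacks).map (fun dp => dp.1 + dp.2))
    (fun x => x)).getD 0)

-- the for-loop: each iteration appends one entry to DP (the loop variable is unused)
def solutionAltLoop (cardpacks : List Int) : List Int → List Int → List Int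
  | DP, [] => DP
  | DP, _ :: rest => solutionAltLoop cardpacks (DP ++ [solutionAltBest DP cardpacks]) rest

def solution_alt (N : Int) (cardpacks : List Int) : Int :=
  -- DP = [0, cardpacks[0]]
  let DPf := solutionAltLoop cardpacks [0, PySem.List.pyGetD cardpacks 0 0]
    (PySem.List.pyRange 2 (N + 1) 1)
  PySem.List.pyGetD DPf N 0

-- ===== PRECONDITION & SPEC =====
-- Pre_ excludes exactly the inputs where the Python A raises IndexError:
-- N ≤ 0 (DP[1] out of range) or len(cardpacks) < max(1, N) (cardpacks[i-1] out of range).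
def Pre_solution (N : Int) (cardpacks : List Int) : Prop :=
  1 ≤ N ∧ N ≤ (cardpacks.length : Int)
instance (N : Int) (cardpacks : List Int) : Decidable (Pre_solution N cardpacks) := by
  unfold Pre_solution; infer_instance

def pvWitness_solution : Int × List Int := (4, [1, 5, 6, 7])

def Spec_solution (N : Int) (cardpacks : List Int) (out : Int) : Prop := out = solution_alt N cardpacks
instance (N : Int) (cardpacks : List Int) (out : Int) : Decidable (Spec_solution N cardpacks out) := by unfold Spec_solution; infer_instance

-- ===== CLAIM (what is proved, stated in full; the proofs are below) =====
def Claim_equal_solution : Prop := ∀ (N : Int) (cardpacks : List Int), Dom_solution N cardpacks → Pre_solution N cardpacks → Spec_solution N cardpacks (solution N cardpacks)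

-- ===== LEMMAS AND PROOFS =====

-- A's inner loop value (on the reference table D): max(0, max_{0 ≤ j ≤ i/2} DP[i-j]+DP[j]),
-- where at j = 0 the (just pre-set) DP[i] equals cardpacks[i-1].
def innerA (D : Nat → Int) (c : List Int) (i : Nat) : Int :=
  (List.range (i / 2 + 1)).foldl
    (fun m j => max m ((if j = 0 then c.getD (i - 1) 0 else D (i - j)) + D j)) 0

-- B's inner value (j = t+1): max(0, max_{1 ≤ j ≤ i} D[i-j] + c[j-1]).
def innerB (D : Nat → Int) (c : List Int) (i : Nat) : Int :=
  (List.range i).foldl (fun b t => max b (D (i - (t + 1)) + c.getD t 0)) 0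

def refStep (c : List Int) (p : List Int) (k : Nat) : Int :=
  if k = 0 then 0 else if k = 1 then c.getD 0 0 else innerA (fun t => p.getD t 0) c k

def refList (c : List Int) : Nat → List Int
  | 0 => []
  | n + 1 => refList c n ++ [refStep c (refList c n) n]

def refD (c : List Int) (i : Nat) : Int := (refList c (i + 1)).getD i 0

theorem length_refList (c : List Int) (n : Nat) : (refList c n).length = n := by
  induction n with
  | zero => rfl
  | succ n ih => simp [refList, ih]

theorem getD_refList (c : List Int) (n k : Nat) (h : k < n) :
    (refList c n).getD k 0 = refD c k := by
  induction n with
  | zero => omega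
  | succ n ih =>
    rcases Nat.lt_or_ge k n with hk | hk
    · rw [refList, List.getD_append _ _ _ _ (by rw [length_refList]; exact hk)]
      exact ih hk
    · have hk' : k = n := by omega
      subst hk'; rfl

theorem refD_zero (c : List Int) : refD c 0 = 0 := rfl

theorem refD_one (c : List Int) : refD c 1 = c.getD 0 0 := rfl

theorem innerA_congr (D D' : Nat → Int) (c : List Int) (i : Nat) (hi : 1 ≤ i)
    (h : ∀ k, k < i → D k = D' k) : innerA D c i = innerA D' c i := by
  unfold innerA
  apply List.foldl_ext
  intro m j hj
  have hj' : j ≤ i / 2 := by simpa [Nat.lt_succ_iff] using List.mem_range.mp hj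
  rcases Nat.eq_zero_or_pos j with rfl | hjpos
  · simp [h 0 (by omega)]
  · have hj0 : j ≠ 0 := by omega
    rw [if_neg hj0, if_neg hj0, h j (by omega), h (i - j) (by omega)]

theorem refD_of_two_le (c : List Int) (i : Nat) (hi : 2 ≤ i) :
    refD c i = innerA (refD c) c i := by
  have e1 : refList c (i + 1) = refList c i ++ [refStep c (refList c i) i] := rfl
  have e2 : (refList c i).length = i := length_refList c i
  have : refD c i = refStep c (refList c i) i := by
    unfold refD
    rw [e1, List.getD_append_right _ _ _ _ (by omega)]
    simp [e2]
  rw [this]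
  unfold refStep
  rw [if_neg (by omega), if_neg (by omega)]
  exact innerA_congr _ _ c i (by omega) (fun k hk => getD_refList c i k hk)

theorem foldl_max_le_iff {α : Type} (l : List α) (f : α → Int) (a b : Int) :
    l.foldl (fun m x => max m (f x)) a ≤ b ↔ a ≤ b ∧ ∀ x ∈ l, f x ≤ b := by
  induction l generalizing a with
  | nil => simp
  | cons hd tl ih =>
    simp only [List.foldl_cons, ih, max_le_iff, List.mem_cons]
    constructor
    · rintro ⟨⟨h1, h2⟩, h3⟩
      exact ⟨h1, fun x hx => by rcases hx with rfl | hx; exact h2; exact h3 x hx⟩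
    · rintro ⟨h1, h2⟩
      exact ⟨⟨h1, h2 hd (Or.inl rfl)⟩, fun x hx => h2 x (Or.inr hx)⟩

theorem le_foldl_max_init {α : Type} (l : List α) (f : α → Int) (a : Int) :
    a ≤ l.foldl (fun m x => max m (f x)) a :=
  ((foldl_max_le_iff l f a _).mp le_rfl).1

theorem le_foldl_max_of_mem {α : Type} {l : List α} {x : α} (f : α → Int) (a : Int)
    (h : x ∈ l) : f x ≤ l.foldl (fun m x => max m (f x)) a :=
  ((foldl_max_le_iff l f a _).mp le_rfl).2 x h

theorem refD_nonneg (c : List Int) (i : Nat) (h : i ≠ 1) : 0 ≤ refD c i := by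
  rcases Nat.lt_or_ge i 2 with hi | hi
  · interval_cases i
    · simp [refD_zero]
    · omega
  · rw [refD_of_two_le c i hi]
    exact le_foldl_max_init _ _ 0

theorem refD_ge_c (c : List Int) (i : Nat) (h : 1 ≤ i) : c.getD (i - 1) 0 ≤ refD c i := by
  rcases Nat.lt_or_ge i 2 with hi | hi
  · have : i = 1 := by omega
    subst this; simp [refD_one]
  · rw [refD_of_two_le c i hi]
    have h0 : (0 : Nat) ∈ List.range (i / 2 + 1) := List.mem_range.mpr (by omega)
    have := le_foldl_max_of_mem
      (fun j => (if j = 0 then c.getD (i - 1) 0 else refD c (i - j)) + refD c j) 0 h0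
    simpa [refD_zero, innerA] using this

theorem refD_superadd (c : List Int) (a b : Nat) :
    refD c a + refD c b ≤ refD c (a + b) := by
  have key : ∀ a b : Nat, 1 ≤ b → b ≤ a → refD c a + refD c b ≤ refD c (a + b) := by
    intro a b hb hba
    have hi : 2 ≤ a + b := by omega
    rw [refD_of_two_le c (a + b) hi]
    have hmem : b ∈ List.range ((a + b) / 2 + 1) := List.mem_range.mpr (by omega)
    have := le_foldl_max_of_mem
      (fun j => (if j = 0 then c.getD (a + b - 1) 0 else refD c (a + b - j)) + refD c j) 0 hmem
    have hb0 : b ≠ 0 := by omega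
    simpa [innerA, hb0, Nat.add_sub_cancel] using this
  rcases Nat.eq_zero_or_pos b with rfl | hb
  · simp [refD_zero]
  rcases Nat.eq_zero_or_pos a with rfl | ha
  · simp [refD_zero]
  rcases Nat.le_total b a with h | h
  · exact key a b hb h
  · have := key b a ha h
    rw [Nat.add_comm] at this
    omega

theorem bridge (c : List Int) (i : Nat) (hi : 2 ≤ i) :
    innerA (refD c) c i = innerB (refD c) c i := by
  induction i using Nat.strong_induction_on with
  | _ i IH =>
  apply le_antisymm
  · rw [innerA, foldl_max_le_iff]
    refine ⟨le_foldl_max_init _ _ 0, ?_⟩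
    intro j hj
    have hj2 : j ≤ i / 2 := by simpa [Nat.lt_succ_iff] using List.mem_range.mp hj
    rcases Nat.eq_zero_or_pos j with rfl | hjpos
    · have hmem : i - 1 ∈ List.range i := List.mem_range.mpr (by omega)
      have := le_foldl_max_of_mem
        (fun t => refD c (i - (t + 1)) + c.getD t 0) 0 hmem
      have heq : i - (i - 1 + 1) = 0 := by omega
      simp only [heq, refD_zero, zero_add] at this
      simpa [innerB, refD_zero] using this
    · simp only [if_neg (by omega : j ≠ 0)]
      rcases Nat.lt_or_ge j 2 with hj1 | hj1
      · have : j = 1 := by omega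
        subst this
        have hmem : (0 : Nat) ∈ List.range i := List.mem_range.mpr (by omega)
        have := le_foldl_max_of_mem
          (fun t => refD c (i - (t + 1)) + c.getD t 0) 0 hmem
        simpa [innerB, refD_one] using this
      · have hij2 : 2 ≤ i - j := by omega
        have hDj : refD c j = innerB (refD c) c j := by
          rw [refD_of_two_le c j hj1]; exact IH j (by omega) hj1
        have hDij : refD c (i - j) = innerB (refD c) c (i - j) := by
          rw [refD_of_two_le c (i - j) hij2]; exact IH (i - j) (by omega) hij2
        have hmono : refD c (i - j) ≤ innerB (refD c) c i := by
          rw [hDij, innerB, foldl_max_le_iff]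
          refine ⟨le_foldl_max_init _ _ 0, ?_⟩
          intro t ht
          have ht' : t < i - j := List.mem_range.mp ht
          have h1 : refD c (i - j - (t + 1)) ≤ refD c (i - (t + 1)) := by
            have := refD_superadd c (i - j - (t + 1)) j
            have h0 : 0 ≤ refD c j := refD_nonneg c j (by omega)
            have heq : i - j - (t + 1) + j = i - (t + 1) := by omega
            rw [heq] at this; omega
          have hmem : t ∈ List.range i := List.mem_range.mpr (by omega)
          have := le_foldl_max_of_mem
            (fun t => refD c (i - (t + 1)) + c.getD t 0) 0 hmem
          calc refD c (i - j - (t + 1)) + c.getD t 0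
              ≤ refD c (i - (t + 1)) + c.getD t 0 := by omega
            _ ≤ _ := by simpa [innerB] using this
        rw [hDj]
        have : innerB (refD c) c j ≤ innerB (refD c) c i - refD c (i - j) := by
          rw [innerB, foldl_max_le_iff]
          constructor
          · omega
          · intro t ht
            have ht' : t < j := List.mem_range.mp ht
            have h1 : refD c (i - j) + refD c (j - (t + 1)) ≤ refD c (i - (t + 1)) := by
              have := refD_superadd c (i - j) (j - (t + 1))
              have heq : i - j + (j - (t + 1)) = i - (t + 1) := by omega
              rw [heq] at this; exact this
            have hmem : t ∈ List.range i := List.mem_range.mpr (by omega)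
            have h2 := le_foldl_max_of_mem
              (fun t => refD c (i - (t + 1)) + c.getD t 0) 0 hmem
            have h2' : refD c (i - (t + 1)) + c.getD t 0 ≤ innerB (refD c) c i := by
              simpa [innerB] using h2
            omega
        omega
  · rw [innerB, foldl_max_le_iff]
    refine ⟨le_foldl_max_init _ _ 0, ?_⟩
    intro t ht
    have ht' : t < i := List.mem_range.mp ht
    have h1 : c.getD t 0 ≤ refD c (t + 1) := by
      have := refD_ge_c c (t + 1) (by omega)
      simpa using this
    have h2 : refD c (i - (t + 1)) + refD c (t + 1) ≤ refD c i := by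
      have := refD_superadd c (i - (t + 1)) (t + 1)
      have heq : i - (t + 1) + (t + 1) = i := by omega
      rw [heq] at this; exact this
    rw [← refD_of_two_le c i hi] at *
    omega

theorem refD_of_two_le' (c : List Int) (i : Nat) (hi : 2 ≤ i) :
    refD c i = innerB (refD c) c i := by
  rw [refD_of_two_le c i hi]; exact bridge c i hi

-- getD after set
theorem getD_set_int (l : List Int) (i k : Nat) (v : Int) :
    (l.set i v).getD k 0 = if k = i ∧ i < l.length then v else l.getD k 0 := by
  simp only [List.getD, List.getElem?_set]
  by_cases h1 : i = k
  · subst h1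
    by_cases h2 : i < l.length
    · simp [h2]
    · simp [h2]
  · rw [if_neg h1, if_neg (fun h => h1 h.1.symm)]

-- A-side loop invariant: DP has length n+1, entries up to m are refD, the rest 0
def InvDP (c : List Int) (n m : Nat) (DP : List Int) : Prop :=
  DP.length = n + 1 ∧ ∀ k, k ≤ n → DP.getD k 0 = if k ≤ m then refD c k else 0

-- the A-loop body preserves the invariant and fills entry i
theorem stepA (c : List Int) (n i : Nat) (DP : List Int) (hi : 2 ≤ i) (hin : i ≤ n)
    (hInv : InvDP c n (i - 1) DP) :
    InvDP c n i
      (PySem.List.pySetD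
        (PySem.List.pySetD DP (i : Int) (PySem.List.pyGetD c ((i : Int) - 1) 0))
        (i : Int)
        ((PySem.List.pyRange 0 (PySem.Int.floordiv (i : Int) 2 + 1) 1).foldl (fun m j =>
          let price := PySem.List.pyGetD (PySem.List.pySetD DP (i : Int) (PySem.List.pyGetD c ((i : Int) - 1) 0)) ((i : Int) - j) 0 +
                       PySem.List.pyGetD (PySem.List.pySetD DP (i : Int) (PySem.List.pyGetD c ((i : Int) - 1) 0)) j 0
          if price > m then price else m) 0)) := by
  obtain ⟨hlen, hval⟩ := hInv
  have hgc : PySem.List.pyGetD c ((i : Int) - 1) 0 = c.getD (i - 1) 0 := by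
    have : ((i : Int) - 1) = ((i - 1 : Nat) : Int) := by omega
    rw [this, PySem.List.pyGetD_natCast]
  set DP' := PySem.List.pySetD DP (i : Int) (PySem.List.pyGetD c ((i : Int) - 1) 0) with hDP'
  have hDP'eq : DP' = DP.set i (c.getD (i - 1) 0) := by
    rw [hDP', hgc, PySem.List.pySetD_natCast]
  have hlen' : DP'.length = n + 1 := by rw [hDP'eq]; simpa using hlen
  have hval' : ∀ k, k ≤ n → DP'.getD k 0 =
      if k = i then c.getD (i - 1) 0 else (if k ≤ i - 1 then refD c k else 0) := by
    intro k hk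
    rw [hDP'eq, getD_set_int]
    by_cases hki : k = i
    · subst hki; rw [if_pos ⟨rfl, by omega⟩, if_pos rfl]
    · rw [if_neg (by tauto), if_neg hki, hval k hk]
  have hfd : PySem.Int.floordiv (i : Int) 2 = ((i / 2 : Nat) : Int) :=
    PySem.Int.floordiv_natCast i 2
  have hmp : (PySem.List.pyRange 0 (PySem.Int.floordiv (i : Int) 2 + 1) 1).foldl (fun m j =>
      let price := PySem.List.pyGetD DP' ((i : Int) - j) 0 + PySem.List.pyGetD DP' j 0
      if price > m then price else m) 0 = refD c i := by
    rw [hfd]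
    have hcast : ((i / 2 : Nat) : Int) + 1 = (((i / 2 + 1 : Nat)) : Int) := by push_cast; ring
    rw [hcast, PySem.List.pyRange_zero_natCast, List.foldl_map]
    rw [refD_of_two_le c i hi, innerA]
    apply List.foldl_ext
    intro m j hj
    have hj' : j ≤ i / 2 := by simpa [Nat.lt_succ_iff] using List.mem_range.mp hj
    have hij : ((i : Int) - (j : Int)) = ((i - j : Nat) : Int) := by omega
    rw [hij, PySem.List.pyGetD_natCast, PySem.List.pyGetD_natCast]
    have hDPj : DP'.getD j 0 = refD c j := by
      rw [hval' j (by omega)]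
      rw [if_neg (by omega), if_pos (by omega)]
    have hDPij : DP'.getD (i - j) 0 =
        (if j = 0 then c.getD (i - 1) 0 else refD c (i - j)) := by
      rcases Nat.eq_zero_or_pos j with rfl | hjpos
      · rw [Nat.sub_zero, hval' i (by omega)]; simp
      · rw [hval' (i - j) (by omega), if_neg (by omega), if_pos (by omega),
          if_neg (by omega)]
    rw [hDPj, hDPij]
    have : ∀ a m : Int, (if a > m then a else m) = max m a := by intro a m; omega
    rw [this]
  rw [hmp, PySem.List.pySetD_natCast]
  constructor
  · simpa using hlen'
  · intro k hk
    rw [getD_set_int]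
    by_cases hki : k = i
    · subst hki; rw [if_pos ⟨rfl, by omega⟩, if_pos (le_refl k)]
    · rw [if_neg (by tauto), hval' k hk, if_neg hki]
      by_cases hk1 : k ≤ i - 1
      · rw [if_pos hk1, if_pos (by omega)]
      · rw [if_neg hk1, if_neg (by omega)]

-- A-side loop runner over pyRange i (n+1)
theorem loop_inv (c : List Int) (n : Nat)
    (body : List Int → Int → List Int)
    (hstep : ∀ i DP, 2 ≤ i → i ≤ n → InvDP c n (i - 1) DP → InvDP c n i (body DP (i : Int))) :
    ∀ i DP, 2 ≤ i → i ≤ n + 1 → InvDP c n (i - 1) DP →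
      InvDP c n n ((PySem.List.pyRange (i : Int) ((n : Int) + 1) 1).foldl body DP) := by
  intro i DP hi hin hInv
  induction h : (n + 1 - i) generalizing i DP with
  | zero =>
    have : i = n + 1 := by omega
    subst this
    rw [PySem.List.pyRange_one_eq_nil (by push_cast; omega)]
    simpa using hInv
  | succ d ih =>
    have hin' : i ≤ n := by omega
    rw [PySem.List.pyRange_one_cons (by omega)]
    rw [List.foldl_cons]
    have hcast : ((i : Int) + 1) = ((i + 1 : Nat) : Int) := by omega
    rw [hcast]
    have hInv' : InvDP c n ((i + 1) - 1) (body DP (i : Int)) := by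
      simpa using hstep i DP hi hin' hInv
    exact ih (i + 1) (body DP (i : Int)) (by omega) (by omega) hInv' (by omega)

-- the initial A-side DP (zeros with DP[1] = c[0]) satisfies Inv at m = 1
theorem init_inv (c : List Int) (n : Nat) (hn : 1 ≤ n) (DP0 : List Int)
    (hlen : DP0.length = n + 1) (hzero : ∀ k, DP0.getD k 0 = 0) :
    InvDP c n 1 (PySem.List.pySetD DP0 1 (PySem.List.pyGetD c 0 0)) := by
  have h1 : PySem.List.pySetD DP0 1 (PySem.List.pyGetD c 0 0) = DP0.set 1 (c.getD 0 0) := by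
    rw [PySem.List.pyGetD_zero, show (1 : Int) = ((1 : Nat) : Int) from by norm_num,
      PySem.List.pySetD_natCast]
  rw [h1]
  constructor
  · simpa using hlen
  · intro k hk
    rw [getD_set_int]
    by_cases hk1 : k = 1
    · subst hk1; rw [if_pos ⟨rfl, by omega⟩, if_pos (le_refl 1), refD_one]
    · rw [if_neg (by tauto), hzero k]
      by_cases hk0 : k ≤ 1
      · have : k = 0 := by omega
        subst this; rw [if_pos hk0, refD_zero]
      · rw [if_neg hk0]

theorem solution_eq_refD (N : Int) (c : List Int) (h : Pre_solution N c) :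
    solution N c = refD c N.toNat := by
  obtain ⟨h1, h2⟩ := h
  set n := N.toNat with hn
  have hN : N = (n : Int) := by omega
  have hn1 : 1 ≤ n := by omega
  unfold solution
  rw [hN]
  have hzlen : ((PySem.List.pyRange 0 ((n : Int) + 1) 1).map (fun _ => (0 : Int))).length = n + 1 := by
    rw [List.length_map, PySem.List.length_pyRange_one]; omega
  have hzero : ∀ k, ((PySem.List.pyRange 0 ((n : Int) + 1) 1).map (fun _ => (0 : Int))).getD k 0 = 0 := by
    intro k
    rcases Nat.lt_or_ge k (n + 1) with hk | hk
    · rw [List.getD_eq_getElem _ _ (by rw [hzlen]; exact hk)]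
      simp
    · rw [List.getD_eq_default _ _ (by rw [hzlen]; exact hk)]
  have hinit := init_inv c n hn1 _ hzlen hzero
  have hfinal := loop_inv c n
    (fun DP i =>
      PySem.List.pySetD (PySem.List.pySetD DP i (PySem.List.pyGetD c (i - 1) 0)) i
        ((PySem.List.pyRange 0 (PySem.Int.floordiv i 2 + 1) 1).foldl (fun m j =>
          let price := PySem.List.pyGetD (PySem.List.pySetD DP i (PySem.List.pyGetD c (i - 1) 0)) (i - j) 0 +
                       PySem.List.pyGetD (PySem.List.pySetD DP i (PySem.List.pyGetD c (i - 1) 0)) j 0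
          if price > m then price else m) 0))
    (fun i DP hi hin hInv => stepA c n i DP hi hin hInv)
    2 _ (by omega) (by omega) hinit
  obtain ⟨hflen, hfval⟩ := hfinal
  have hres := hfval n le_rfl
  rw [if_pos le_rfl] at hres
  rw [PySem.List.pyGetD_natCast]
  exact hres

-- B-side invariant: after the entries 0..i-1 have been appended, DP is the refD prefix
def InvB (c : List Int) (i : Nat) (DP : List Int) : Prop :=
  DP.length = i ∧ ∀ k, k < i → DP.getD k 0 = refD c k

-- pulling an outer max into the seed of a running max (Int)
theorem max_foldl_max (l : List Int) (a c : Int) :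
    max c (l.foldl max a) = l.foldl max (max c a) := by
  induction l generalizing a with
  | nil => rfl
  | cons h t ih =>
    simp only [List.foldl_cons]
    rw [ih (max a h), max_assoc]

-- B's zipped term list is exactly the list of unbounded-knapsack sums
theorem terms_eq (c : List Int) (i : Nat) (DP : List Int) (hic : i ≤ c.length)
    (hInv : InvB c i DP) :
    (DP.reverse.zip c).map (fun dp => dp.1 + dp.2) =
      (List.range i).map (fun t => refD c (i - (t + 1)) + c.getD t 0) := by
  obtain ⟨hlen, hval⟩ := hInv
  apply List.ext_getElem
  · simp [hlen, Nat.min_eq_left hic]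
  · intro t h1 h2
    have ht : t < i := by simpa using h2
    have htc : t < c.length := by omega
    have htd : t < DP.length := by omega
    simp only [List.getElem_map, List.getElem_zip, List.getElem_reverse, List.getElem_range]
    have hDP : DP[DP.length - 1 - t] = refD c (i - (t + 1)) := by
      have := hval (i - (t + 1)) (by omega)
      rw [List.getD_eq_getElem _ _ (by omega)] at this
      simp only [show DP.length - 1 - t = i - (t + 1) from by omega]
      exact this
    rw [hDP, List.getD_eq_getElem _ _ htc]

-- B's appended value equals refD at the current length i
theorem best_eq_refD (c : List Int) (i : Nat) (DP : List Int) (hi : 2 ≤ i)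
    (hic : i ≤ c.length) (hInv : InvB c i DP) : solutionAltBest DP c = refD c i := by
  unfold solutionAltBest
  rw [terms_eq c i DP hic hInv]
  rw [refD_of_two_le' c i hi, innerB]
  have hfold : (List.range i).foldl
      (fun b t => max b (refD c (i - (t + 1)) + c.getD t 0)) 0 =
      ((List.range i).map (fun t => refD c (i - (t + 1)) + c.getD t 0)).foldl max 0 := by
    rw [List.foldl_map]
  rw [hfold]
  obtain ⟨x, tl, hxt⟩ : ∃ x tl, (List.range i).map
      (fun t => refD c (i - (t + 1)) + c.getD t 0) = x :: tl := by
    have : i ≠ 0 := by omega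
    cases h : (List.range i).map (fun t => refD c (i - (t + 1)) + c.getD t 0) with
    | nil => exfalso; apply this; simpa using congrArg List.length h
    | cons x tl => exact ⟨x, tl, rfl⟩
  rw [hxt, PySem.List.max?_id_cons, Option.getD_some, List.foldl_cons,
    max_foldl_max, max_comm]

-- running B's recursion over pyRange i (n+1) extends the refD prefix to n+1
theorem loopB_inv (c : List Int) (n : Nat) (hnc : n ≤ c.length) :
    ∀ i DP, 2 ≤ i → i ≤ n + 1 → InvB c i DP →
      InvB c (n + 1) (solutionAltLoop c DP (PySem.List.pyRange (i : Int) ((n : Int) + 1) 1)) := by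
  intro i DP hi hin hInv
  induction h : (n + 1 - i) generalizing i DP with
  | zero =>
    have : i = n + 1 := by omega
    subst this
    rw [PySem.List.pyRange_one_eq_nil (by push_cast; omega)]
    simpa [solutionAltLoop] using hInv
  | succ d ih =>
    have hin' : i ≤ n := by omega
    rw [PySem.List.pyRange_one_cons (by omega)]
    rw [solutionAltLoop]
    have hcast : ((i : Int) + 1) = ((i + 1 : Nat) : Int) := by omega
    rw [hcast]
    obtain ⟨hlen, hval⟩ := hInv
    have hbest := best_eq_refD c i DP hi (by omega) ⟨hlen, hval⟩
    have hInv' : InvB c (i + 1) (DP ++ [solutionAltBest DP c]) := by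
      constructor
      · simp [hlen]
      · intro k hk
        rcases Nat.lt_or_ge k i with hk' | hk'
        · rw [List.getD_append _ _ _ _ (by omega)]
          exact hval k hk'
        · have : k = i := by omega
          subst this
          rw [List.getD_append_right _ _ _ _ (by omega)]
          simp [hlen, hbest]
    exact ih (i + 1) _ (by omega) (by omega) hInv' (by omega)

theorem solution_alt_eq_refD (N : Int) (c : List Int) (h : Pre_solution N c) :
    solution_alt N c = refD c N.toNat := by
  obtain ⟨h1, h2⟩ := h
  set n := N.toNat with hn
  have hN : N = (n : Int) := by omega
  have hn1 : 1 ≤ n := by omega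
  unfold solution_alt
  rw [hN]
  have hinit : InvB c 2 [0, PySem.List.pyGetD c 0 0] := by
    constructor
    · rfl
    · intro k hk
      interval_cases k
      · simp [refD_zero]
      · rw [PySem.List.pyGetD_zero, refD_one]; rfl
  have hfinal := loopB_inv c n (by omega) 2 _ (by omega) (by omega) hinit
  obtain ⟨hflen, hfval⟩ := hfinal
  have hres := hfval n (by omega)
  rw [PySem.List.pyGetD_natCast]
  exact hres

-- ===== VERDICT (by name: the statement is the Claim_ definition above) =====
theorem solution_spec : Claim_equal_solution := by
  intro N cardpacks _ hpre
  unfold Spec_solution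
  rw [solution_eq_refD N cardpacks hpre, solution_alt_eq_refD N cardpacks hpre]
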